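-- pv_equiv track=rewrite | github.com/GoogleCloudPlatform/snapshot-debugger | snapshot_dbg_cli/breakpoint_utils.py | split_log_expressions
-- ===== SOURCE A (Python) =====
-- def split_log_expressions(format_string):
--   """Extracts {expression} substrings into a separate array.
--
--   Each substring of the form {expression} will be extracted into an array, and
--   each {expression} substring will be replaced with $N, where N is the index
--   of the extraced expression in the array. Any '$' sequence outside an
--   expression will be escaped with '$$'.
--
--   For example, given the input:
--     'a={a}, b={b}'
--    The return value would be:
--     ('a=$0, b=$1', ['a', 'b'])
--
--   Args:
--     format_string: The string to process.
--   Returns: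
--     string, [string]) - The new format string and the array of expressions.
--   Raises:
--     Error: If the string has unbalanced braces.
--   """
--   expressions = []
--   log_format = ''
--   current_expression = ''
--   brace_count = 0
--   need_separator = False
--   for c in format_string:
--     if need_separator and c.isdigit():
--       log_format += ' '
--     need_separator = False
--     if c == '{':
--       if brace_count:
--         # Nested braces
--         current_expression += c
--       else:
--         # New expression
--         current_expression = ''
--       brace_count += 1
--     elif not brace_count:
--       if c == '}':
--         # Unbalanced left brace.
--         raise ValueError(
--             'There are too many "}" characters in the log format string')
--       elif c == '$':
--         # Escape '$'
--         log_format += '$$'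
--       else:
--         # Not in or starting an expression.
--         log_format += c
--     else:
--       # Currently reading an expression.
--       if c != '}':
--         current_expression += c
--         continue
--       brace_count -= 1
--       if brace_count == 0:
--         # Finish processing the expression
--         if current_expression in expressions:
--           i = expressions.index(current_expression)
--         else:
--           i = len(expressions)
--           expressions.append(current_expression)
--         log_format += f'${i}'
--         # If the next character is a digit, we need an extra space to prevent
--         # the agent from combining the positional argument with the subsequent
--         # digits.
--         need_separator = True
--       else:
--         # Closing a nested brace
--         current_expression += c
--
--   if brace_count:
--     # Unbalanced left brace.
--     raise ValueError(
--         'There are too many "{" characters in the log format string')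
--
--   return log_format, expressions
-- ===== SOURCE B (Python) =====
-- def split_log_expressions(format_string):
--   """Two-phase version: tokenize into literal/expression tokens, then render."""
--   # Phase 1: tokenize.
--   tokens = []
--   i, n = 0, len(format_string)
--   while i < n:
--     c = format_string[i]
--     i += 1
--     if c == '}':
--       raise ValueError(
--           'There are too many "}" characters in the log format string')
--     if c == '{':
--       depth, buf = 1, []
--       while i < n and depth:
--         ch = format_string[i]
--         i += 1
--         if ch == '{':
--           depth += 1
--         elif ch == '}':
--           depth -= 1
--         if depth:
--           buf.append(ch)
--       if depth:
--         raise ValueError(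
--             'There are too many "{" characters in the log format string')
--       tokens.append(('expr', ''.join(buf)))
--     else:
--       tokens.append(('lit', c))
--   # Phase 2: render.
--   expressions = []
--   parts = []
--   for k, (kind, text) in enumerate(tokens):
--     if kind == 'lit':
--       parts.append('$$' if text == '$' else text)
--     else:
--       if text in expressions:
--         idx = expressions.index(text)
--       else:
--         idx = len(expressions)
--         expressions.append(text)
--       parts.append('$%d' % idx)
--       if k + 1 < len(tokens) and tokens[k + 1][0] == 'lit' and tokens[k + 1][1].isdigit():
--         parts.append(' ')
--   return ''.join(parts), expressions
-- ===== Notes on version B (the rewrite author's own statement) =====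
-- stated objective: alternative
-- what changed: A's single fused character state machine (5 mutable state variables: expressions, output, current expression, brace depth, separator flag) is split into two phases: a tokenizer that produces a list of literal/expression tokens via a brace-depth scan, then a renderer that escapes literals, deduplicates expressions and decides the digit-separator by looking at the next token instead of carrying a flag.
import Mathlib
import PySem

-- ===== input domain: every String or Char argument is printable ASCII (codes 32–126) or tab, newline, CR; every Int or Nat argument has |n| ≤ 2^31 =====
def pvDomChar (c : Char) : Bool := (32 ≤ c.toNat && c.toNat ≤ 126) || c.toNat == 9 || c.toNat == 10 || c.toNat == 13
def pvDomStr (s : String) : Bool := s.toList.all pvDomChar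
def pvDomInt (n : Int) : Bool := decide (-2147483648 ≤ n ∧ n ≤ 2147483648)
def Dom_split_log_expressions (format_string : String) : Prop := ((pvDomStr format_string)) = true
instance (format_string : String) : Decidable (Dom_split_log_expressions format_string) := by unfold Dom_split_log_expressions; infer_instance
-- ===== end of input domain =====

-- B re-decomposes A's fused character state machine into tokenize-then-render (objective: alternative, same cost).

-- ===== PORT A =====
-- A's loop state: (expressions, log_format, current_expression, brace_count, need_separator);
-- strings are modelled as List Char, 'none' is where the Python raises ValueError.
def slxStepA (st : Option (List (List Char) × List Char × List Char × Nat × Bool)) (c : Char) :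
    Option (List (List Char) × List Char × List Char × Nat × Bool) :=
  match st with
  | none => none
  | some (es, lf, cur, bc, ns) =>
    let lf := if ns && PySem.Chars.isdigit c then lf ++ [' '] else lf
    if c = '{' then
      if bc ≠ 0 then some (es, lf, cur ++ [c], bc + 1, false)
      else some (es, lf, [], bc + 1, false)
    else if bc = 0 then
      if c = '}' then none
      else if c = '$' then some (es, lf ++ ['$', '$'], cur, bc, false)
      else some (es, lf ++ [c], cur, bc, false)
    else if c ≠ '}' then some (es, lf, cur ++ [c], bc, false)
    else if bc - 1 = 0 then
      match PySem.List.index? es cur with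
      | some i => some (es, lf ++ '$' :: PySem.Int.toChars (i : Int), cur, 0, true)
      | none => some (es ++ [cur], lf ++ '$' :: PySem.Int.toChars (es.length : Int), cur, 0, true)
    else some (es, lf, cur ++ [c], bc - 1, false)

def split_log_expressions (format_string : String) : String × List String :=
  match format_string.toList.foldl slxStepA (some ([], [], [], 0, false)) with
  | some (es, lf, _, 0, _) => (String.ofList lf, es.map String.ofList)
  | _ => ("", [])   -- the Python raises ValueError here (excluded by Pre_)

-- ===== PORT B =====
inductive SlxTok where
  | lit : Char → SlxTok
  | expr : List Char → SlxTok
deriving DecidableEq, Repr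

-- content between matching outermost braces (depth = extra nesting); none = unmatched '{'
def slxGrab : List Char → Nat → Option (List Char × List Char)
  | [], _ => none
  | c :: r, d =>
    if c = '{' then (slxGrab r (d + 1)).map (fun p => (c :: p.1, p.2))
    else if c = '}' then
      match d with
      | 0 => some ([], r)
      | d' + 1 => (slxGrab r d').map (fun p => (c :: p.1, p.2))
    else (slxGrab r d).map (fun p => (c :: p.1, p.2))

theorem slxGrab_length : ∀ (cs : List Char) (d : Nat) (e rest : List Char),
    slxGrab cs d = some (e, rest) → rest.length < cs.length := by
  intro cs
  induction cs with
  | nil => intro d e rest h; simp [slxGrab] at h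
  | cons c r ih =>
    intro d e rest h
    simp only [slxGrab] at h
    split_ifs at h with h1 h2
    · simp only [Option.map_eq_some_iff] at h
      obtain ⟨⟨e', rest'⟩, hp, he⟩ := h
      cases he
      have := ih _ _ _ hp
      simpa using Nat.lt_succ_of_lt this
    · cases d with
      | zero => simp at h; cases h.2; simp
      | succ d' =>
        simp only [Option.map_eq_some_iff] at h
        obtain ⟨⟨e', rest'⟩, hp, he⟩ := h
        cases he
        have := ih _ _ _ hp
        simpa using Nat.lt_succ_of_lt this
    · simp only [Option.map_eq_some_iff] at h
      obtain ⟨⟨e', rest'⟩, hp, he⟩ := h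
      cases he
      have := ih _ _ _ hp
      simpa using Nat.lt_succ_of_lt this

-- phase 1: token list (literal chars and extracted expressions); none = unbalanced braces
def slxTok : List Char → Option (List SlxTok)
  | [] => some []
  | c :: r =>
    if c = '}' then none
    else if c = '{' then
      match hg : slxGrab r 0 with
      | none => none
      | some (e, rest) => (slxTok rest).map (SlxTok.expr e :: ·)
    else (slxTok r).map (SlxTok.lit c :: ·)
termination_by cs => cs.length
decreasing_by
  · exact Nat.lt_succ_of_lt (slxGrab_length r 0 e rest hg)
  · simp

def slxEsc (c : Char) : List Char := if c = '$' then ['$', '$'] else [c]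

-- separator: a space iff the next token is a literal digit
def slxSep : List SlxTok → List Char
  | SlxTok.lit c :: _ => if PySem.Chars.isdigit c then [' '] else []
  | _ => []

-- phase 2: render the tokens
def slxRender : List SlxTok → List (List Char) → List Char → List Char × List (List Char)
  | [], es, acc => (acc, es)
  | SlxTok.lit c :: ts, es, acc => slxRender ts es (acc ++ slxEsc c)
  | SlxTok.expr e :: ts, es, acc =>
    match PySem.List.index? es e with
    | some i => slxRender ts es (acc ++ '$' :: PySem.Int.toChars (i : Int) ++ slxSep ts)
    | none => slxRender ts (es ++ [e]) (acc ++ '$' :: PySem.Int.toChars (es.length : Int) ++ slxSep ts)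

def split_log_expressions_alt (format_string : String) : String × List String :=
  match slxTok format_string.toList with
  | none => ("", [])   -- the Python raises ValueError here (excluded by Pre_)
  | some ts =>
    let p := slxRender ts [] []
    (String.ofList p.1, p.2.map String.ofList)

-- ===== PRECONDITION & SPEC =====
-- Pre_ excludes exactly the unbalanced-brace strings, on which the Python A raises ValueError.
def Pre_split_log_expressions (format_string : String) : Prop :=
  format_string.toList.count '{' = format_string.toList.count '}' ∧
  ∀ n ∈ List.range (format_string.toList.length + 1),
    (format_string.toList.take n).count '}' ≤ (format_string.toList.take n).count '{'
instance (format_string : String) : Decidable (Pre_split_log_expressions format_string) := by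
  unfold Pre_split_log_expressions; infer_instance

def pvWitness_split_log_expressions : String := "a={a}, b={b}"

def Spec_split_log_expressions (format_string : String) (out : String × List String) : Prop :=
  out = split_log_expressions_alt format_string
instance (format_string : String) (out : String × List String) :
    Decidable (Spec_split_log_expressions format_string out) := by
  unfold Spec_split_log_expressions; infer_instance

-- ===== CLAIM (what is proved, stated in full; the proofs are below) =====
def Claim_equal_split_log_expressions : Prop :=
  ∀ (format_string : String), Dom_split_log_expressions format_string →
    Pre_split_log_expressions format_string →
    Spec_split_log_expressions format_string (split_log_expressions format_string)

-- ===== LEMMAS AND PROOFS =====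

-- A's state right after finishing an expression x at depth 0
def slxFinish (es : List (List Char)) (lf x : List Char) :
    Option (List (List Char) × List Char × List Char × Nat × Bool) :=
  match PySem.List.index? es x with
  | some i => some (es, lf ++ '$' :: PySem.Int.toChars (i : Int), x, 0, true)
  | none => some (es ++ [x], lf ++ '$' :: PySem.Int.toChars (es.length : Int), x, 0, true)

def slxOut (st : Option (List (List Char) × List Char × List Char × Nat × Bool)) :
    String × List String :=
  match st with
  | some (es, lf, _, 0, _) => (String.ofList lf, es.map String.ofList)
  | _ => ("", [])

def slxOutB (p : List Char × List (List Char)) : String × List String :=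
  (String.ofList p.1, p.2.map String.ofList)

def slxNsSep (ns : Bool) (cs : List Char) : List Char :=
  if ns && (match cs with | c :: _ => PySem.Chars.isdigit c | [] => false) then [' '] else []

theorem slx_foldl_none (cs : List Char) : cs.foldl slxStepA none = none := by
  induction cs with
  | nil => rfl
  | cons c r ih => simpa [List.foldl, slxStepA] using ih

-- inside an open brace: A's loop consumes exactly what slxGrab extracts
theorem slx_inside_some : ∀ (cs : List Char) (d : Nat) (es : List (List Char)) (lf cur e rest : List Char),
    slxGrab cs d = some (e, rest) →
    cs.foldl slxStepA (some (es, lf, cur, d + 1, false)) =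
      rest.foldl slxStepA (slxFinish es lf (cur ++ e)) := by
  intro cs
  induction cs with
  | nil => intro d es lf cur e rest h; simp [slxGrab] at h
  | cons c r ih =>
    intro d es lf cur e rest h
    simp only [slxGrab] at h
    by_cases h1 : c = '{'
    · subst h1
      rw [if_pos rfl] at h
      cases hgr : slxGrab r (d + 1) with
      | none => rw [hgr] at h; cases h
      | some p =>
        obtain ⟨e', rest'⟩ := p
        rw [hgr] at h
        simp only [Option.map_some, Option.some_inj, Prod.mk.injEq] at h
        obtain ⟨rfl, rfl⟩ := h
        have hstep : slxStepA (some (es, lf, cur, d + 1, false)) '{' =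
            some (es, lf, cur ++ ['{'], d + 2, false) := by
          simp [slxStepA]
        rw [List.foldl_cons, hstep, ih (d + 1) es lf (cur ++ ['{']) e' rest' hgr]
        simp
    · by_cases h2 : c = '}'
      · subst h2
        rw [if_neg h1, if_pos rfl] at h
        cases d with
        | zero =>
          rw [Option.some_inj, Prod.mk.injEq] at h
          obtain ⟨rfl, rfl⟩ := h
          have hstep : slxStepA (some (es, lf, cur, 1, false)) '}' = slxFinish es lf cur := by
            simp [slxStepA, slxFinish]
          rw [List.foldl_cons, hstep]
          simp
        | succ d' =>
          simp only [Nat.add_one] at h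
          cases hgr : slxGrab r d' with
          | none => rw [hgr] at h; cases h
          | some p =>
            obtain ⟨e', rest'⟩ := p
            rw [hgr] at h
            simp only [Option.map_some, Option.some_inj, Prod.mk.injEq] at h
            obtain ⟨rfl, rfl⟩ := h
            have hstep : slxStepA (some (es, lf, cur, d' + 2, false)) '}' =
                some (es, lf, cur ++ ['}'], d' + 1, false) := by
              simp [slxStepA]
            rw [List.foldl_cons, hstep, ih d' es lf (cur ++ ['}']) e' rest' hgr]
            simp
      · rw [if_neg h1, if_neg h2] at h
        cases hgr : slxGrab r d with
        | none => rw [hgr] at h; cases h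
        | some p =>
          obtain ⟨e', rest'⟩ := p
          rw [hgr] at h
          simp only [Option.map_some, Option.some_inj, Prod.mk.injEq] at h
          obtain ⟨rfl, rfl⟩ := h
          have hstep : slxStepA (some (es, lf, cur, d + 1, false)) c =
              some (es, lf, cur ++ [c], d + 1, false) := by
            simp [slxStepA, h1, h2]
          rw [List.foldl_cons, hstep, ih d es lf (cur ++ [c]) e' rest' hgr]
          simp

-- inside an open brace that never closes: the loop ends with brace_count > 0
theorem slx_inside_none : ∀ (cs : List Char) (d : Nat) (es : List (List Char)) (lf cur : List Char),
    slxGrab cs d = none →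
    ∃ es' cur' d', cs.foldl slxStepA (some (es, lf, cur, d + 1, false)) =
      some (es', lf, cur', d' + 1, false) := by
  intro cs
  induction cs with
  | nil => intro d es lf cur _; exact ⟨es, cur, d, rfl⟩
  | cons c r ih =>
    intro d es lf cur h
    simp only [slxGrab] at h
    by_cases h1 : c = '{'
    · subst h1
      rw [if_pos rfl, Option.map_eq_none_iff] at h
      have hstep : slxStepA (some (es, lf, cur, d + 1, false)) '{' =
          some (es, lf, cur ++ ['{'], d + 2, false) := by
        simp [slxStepA]
      rw [List.foldl_cons, hstep]
      exact ih (d + 1) es lf (cur ++ ['{']) h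
    · by_cases h2 : c = '}'
      · subst h2
        rw [if_neg h1, if_pos rfl] at h
        cases d with
        | zero => cases h
        | succ d' =>
          simp only [Nat.add_one] at h
          rw [Option.map_eq_none_iff] at h
          have hstep : slxStepA (some (es, lf, cur, d' + 2, false)) '}' =
              some (es, lf, cur ++ ['}'], d' + 1, false) := by
            simp [slxStepA]
          rw [List.foldl_cons, hstep]
          exact ih d' es lf (cur ++ ['}']) h
      · rw [if_neg h1, if_neg h2, Option.map_eq_none_iff] at h
        have hstep : slxStepA (some (es, lf, cur, d + 1, false)) c =
            some (es, lf, cur ++ [c], d + 1, false) := by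
          simp [slxStepA, h1, h2]
        rw [List.foldl_cons, hstep]
        exact ih d es lf (cur ++ [c]) h

theorem slxTok_cons_close (r : List Char) : slxTok ('}' :: r) = none := by
  simp [slxTok]

theorem slxTok_cons_open (r : List Char) :
    slxTok ('{' :: r) = match slxGrab r 0 with
      | none => none
      | some (e, rest) => (slxTok rest).map (SlxTok.expr e :: ·) := by
  have hne : ¬ ('{' : Char) = '}' := by decide
  rw [slxTok, if_neg hne, if_pos rfl]
  split <;> simp_all

theorem slxTok_cons_lit (c : Char) (r : List Char) (h1 : c ≠ '}') (h2 : c ≠ '{') :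
    slxTok (c :: r) = (slxTok r).map (SlxTok.lit c :: ·) := by
  rw [slxTok]
  simp [h1, h2]

-- B's render-time separator agrees with A's need_separator flag
theorem slx_sep_eq (rest : List Char) (ts : List SlxTok) (h : slxTok rest = some ts) :
    slxSep ts = slxNsSep true rest := by
  have hd : PySem.Chars.isdigit '{' = false := by decide
  cases rest with
  | nil =>
    simp only [slxTok, Option.some_inj] at h
    subst h
    rfl
  | cons c r =>
    by_cases h1 : c = '}'
    · subst h1; rw [slxTok_cons_close] at h; cases h
    · by_cases h2 : c = '{'
      · subst h2
        rw [slxTok_cons_open] at h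
        cases hg : slxGrab r 0 with
        | none => rw [hg] at h; cases h
        | some p =>
          obtain ⟨e, rest'⟩ := p
          rw [hg] at h
          simp only [Option.map_eq_some_iff] at h
          obtain ⟨ts', _, rfl⟩ := h
          simp [slxSep, slxNsSep, hd]
      · rw [slxTok_cons_lit c r h1 h2] at h
        simp only [Option.map_eq_some_iff] at h
        obtain ⟨ts', _, rfl⟩ := h
        simp only [slxSep, slxNsSep, Bool.true_and]

-- main simulation: A's fused loop at depth 0 equals tokenize-then-render
theorem slx_main : ∀ (n : Nat) (cs : List Char), cs.length ≤ n →
    ∀ (es : List (List Char)) (lf cur : List Char) (ns : Bool),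
    slxOut (cs.foldl slxStepA (some (es, lf, cur, 0, ns))) =
      (match slxTok cs with
       | none => ("", [])
       | some ts => slxOutB (slxRender ts es (lf ++ slxNsSep ns cs))) := by
  intro n
  induction n with
  | zero =>
    intro cs hlen es lf cur ns
    rw [List.length_eq_zero_iff.mp (Nat.le_zero.mp hlen)]
    simp [slxTok, slxOut, slxOutB, slxNsSep, slxRender]
  | succ n ih =>
    intro cs hlen es lf cur ns
    cases cs with
    | nil => simp [slxTok, slxOut, slxOutB, slxNsSep, slxRender]
    | cons c r =>
      have hr : r.length ≤ n := Nat.succ_le_succ_iff.mp hlen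
      by_cases h1 : c = '}'
      · subst h1
        have hd : PySem.Chars.isdigit '}' = false := by decide
        have hstep : slxStepA (some (es, lf, cur, 0, ns)) '}' = none := by
          simp [slxStepA, hd]
        rw [List.foldl_cons, hstep, slx_foldl_none, slxTok_cons_close]
        rfl
      · by_cases h2 : c = '{'
        · subst h2
          have hd : PySem.Chars.isdigit '{' = false := by decide
          have hns : slxNsSep ns ('{' :: r) = [] := by
            simp [slxNsSep, hd]
          have hstep : slxStepA (some (es, lf, cur, 0, ns)) '{' =
              some (es, lf, [], 1, false) := by
            simp [slxStepA, hd]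
          rw [List.foldl_cons, hstep, slxTok_cons_open, hns, List.append_nil]
          cases hg : slxGrab r 0 with
          | none =>
            obtain ⟨es', cur', d', heq⟩ := slx_inside_none r 0 es lf [] hg
            rw [heq]
            rfl
          | some p =>
            obtain ⟨e, rest⟩ := p
            have hrest : rest.length ≤ n :=
              Nat.le_of_lt (Nat.lt_of_lt_of_le (slxGrab_length r 0 e rest hg) hr)
            rw [slx_inside_some r 0 es lf [] e rest hg]
            simp only [List.nil_append]
            unfold slxFinish
            cases hi : PySem.List.index? es e with
            | some i =>
              rw [ih rest hrest es (lf ++ '$' :: PySem.Int.toChars (i : Int)) e true]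
              cases ht : slxTok rest with
              | none => rfl
              | some ts' =>
                simp only [Option.map_some]
                rw [slxRender, hi, slx_sep_eq rest ts' ht]
            | none =>
              rw [ih rest hrest (es ++ [e]) (lf ++ '$' :: PySem.Int.toChars (es.length : Int)) e true]
              cases ht : slxTok rest with
              | none => rfl
              | some ts' =>
                simp only [Option.map_some]
                rw [slxRender, hi, slx_sep_eq rest ts' ht]
        · have hns : slxNsSep ns (c :: r) =
              (if ns && PySem.Chars.isdigit c then [' '] else []) := by
            simp [slxNsSep]
          have hstep : slxStepA (some (es, lf, cur, 0, ns)) c =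
              some (es, (if ns && PySem.Chars.isdigit c then lf ++ [' '] else lf) ++ slxEsc c,
                cur, 0, false) := by
            by_cases h3 : c = '$'
            · subst h3; simp [slxStepA, slxEsc]
            · simp [slxStepA, slxEsc, h1, h2, h3]
          rw [List.foldl_cons, hstep, ih r hr es _ cur false, slxTok_cons_lit c r h1 h2]
          cases ht : slxTok r with
          | none => rfl
          | some ts =>
            simp only [Option.map_some]
            rw [slxRender, hns]
            have : slxNsSep false r = [] := by simp [slxNsSep]
            rw [this, List.append_nil]
            by_cases h4 : ns && PySem.Chars.isdigit c
            · simp [h4]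
            · simp [h4]

theorem slx_total (s : String) : split_log_expressions s = split_log_expressions_alt s := by
  have hA : split_log_expressions s =
      slxOut (s.toList.foldl slxStepA (some ([], [], [], 0, false))) := rfl
  rw [hA, slx_main s.toList.length s.toList le_rfl [] [] [] false]
  unfold split_log_expressions_alt
  cases ht : slxTok s.toList with
  | none => rfl
  | some ts =>
    have : slxNsSep false s.toList = [] := by simp [slxNsSep]
    rw [this]
    rfl

-- ===== VERDICT (by name: the statement is the Claim_ definition above) =====
theorem split_log_expressions_spec : Claim_equal_split_log_expressions := by
  intro s _ _
  show split_log_expressions s = split_log_expressions_alt s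
  exact slx_total s
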